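-- pv_equiv track=rewrite | github.com/bakerwm/hiseq_modules | call_snp/edits_parser.py | top_key
-- ===== SOURCE A (Python) =====
-- def top_key(d, ref):
--     """Pick most content key
--     input: dict [count or pct]
--
--     output: A|C|G|T|-
--
--     # top1 (n=1): A
--     # top1 (n>1): A,C,...
--     # top1 (n=0): -
--
--     """
--     # top keys
--     h1 = [i for i, j in iter(d.items()) if j == max(d.values())]
--
--     # check ref
--     if ref in h1:
--         h1.remove(ref)
--
--     # check output
--     if len(h1) == 1:
--         out = h1[0]
--     elif len(h1) > 1:
--         out = ','.join(h1)
--     else: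
--         out = '-'
--
--     return out
-- ===== SOURCE B (Python) =====
-- def top_key(d, ref):
--     # One pass: track the running maximum value and the keys achieving it.
--     best = None
--     h1 = []
--     for k, v in d.items():
--         if best is None or v > best:
--             best = v
--             h1 = [k]
--         elif v == best:
--             h1.append(k)
--     if ref in h1:
--         h1.remove(ref)
--     if len(h1) == 1:
--         return h1[0]
--     elif h1:
--         return ','.join(h1)
--     return '-'
-- ===== Notes on version B (the rewrite author's own statement) =====
-- stated objective: faster
-- what changed: B replaces the comprehension that recomputes max(d.values()) for every item with a single pass that maintains the running maximum and the list of keys achieving it.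
import Mathlib
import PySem

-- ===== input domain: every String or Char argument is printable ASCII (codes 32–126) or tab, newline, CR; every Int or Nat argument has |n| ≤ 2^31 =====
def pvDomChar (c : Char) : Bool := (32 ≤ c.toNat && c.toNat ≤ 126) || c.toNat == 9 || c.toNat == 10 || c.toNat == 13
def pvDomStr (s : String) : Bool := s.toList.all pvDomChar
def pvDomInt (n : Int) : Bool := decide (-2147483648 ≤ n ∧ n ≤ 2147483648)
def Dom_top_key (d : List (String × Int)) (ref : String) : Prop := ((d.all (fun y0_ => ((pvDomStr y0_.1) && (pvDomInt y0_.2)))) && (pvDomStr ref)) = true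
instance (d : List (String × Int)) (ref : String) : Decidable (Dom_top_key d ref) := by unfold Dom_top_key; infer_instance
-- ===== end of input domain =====

-- B replaces A's comprehension, which recomputes max(d.values()) for every item, by a
-- single pass maintaining the running maximum and the keys achieving it (objective: faster).

-- ===== PORT A =====
def top_key (d : List (String × Int)) (ref : String) : String :=
  -- h1 = [i for i, j in iter(d.items()) if j == max(d.values())]
  let h1 := d.foldl (fun acc p =>
      if some p.2 = PySem.List.max? (d.map Prod.snd) (fun y => y) then acc ++ [p.1] else acc) []
  -- if ref in h1: h1.remove(ref)
  let h1 := if h1.contains ref then (PySem.List.remove? h1 ref).getD h1 else h1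
  if h1.length = 1 then (PySem.List.pyGet? h1 0).getD ""
  else if h1.length > 1 then PySem.Str.join "," h1
  else "-"

-- ===== PORT B =====
-- B's loop body: best = None | update (best, h1) from the next (k, v)
def stepB : (Option Int × List String) → (String × Int) → (Option Int × List String) :=
  fun st p =>
    match st.1 with
    | none => (some p.2, [p.1])
    | some b => if b < p.2 then (some p.2, [p.1])
                else if p.2 = b then (st.1, st.2 ++ [p.1]) else st

def top_key_alt (d : List (String × Int)) (ref : String) : String :=
  let h1 := (d.foldl stepB (none, [])).2
  let h1 := if h1.contains ref then (PySem.List.remove? h1 ref).getD h1 else h1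
  if h1.length = 1 then (PySem.List.pyGet? h1 0).getD ""
  else if h1 ≠ [] then PySem.Str.join "," h1
  else "-"

-- ===== PRECONDITION & SPEC =====
def Spec_top_key (d : List (String × Int)) (ref : String) (out : String) : Prop := out = top_key_alt d ref
instance (d : List (String × Int)) (ref : String) (out : String) : Decidable (Spec_top_key d ref out) := by unfold Spec_top_key; infer_instance

-- ===== CLAIM (what is proved, stated in full; the proofs are below) =====
def Claim_equal_top_key : Prop := ∀ (d : List (String × Int)) (ref : String), Dom_top_key d ref → Spec_top_key d ref (top_key d ref)

-- ===== LEMMAS AND PROOFS =====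

-- running max over the pairs' second components
def runM (t : List (String × Int)) (b : Int) : Int := t.foldl (fun m p => max m p.2) b

theorem runM_cons (p : String × Int) (t : List (String × Int)) (b : Int) :
    runM (p :: t) b = runM t (max b p.2) := rfl

theorem le_runM (t : List (String × Int)) (b : Int) : b ≤ runM t b := by
  induction t generalizing b with
  | nil => simp [runM]
  | cons p t ih =>
      exact le_trans (le_max_left b p.2) (by simpa [runM_cons] using ih (max b p.2))

-- invariant for B's fold from a live state
theorem foldB_inv (t : List (String × Int)) (b : Int) (acc : List String) :
    t.foldl stepB (some b, acc)
      = (some (runM t b),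
         (if b = runM t b then acc else [])
           ++ (t.filter (fun p => p.2 = runM t b)).map Prod.fst) := by
  induction t generalizing b acc with
  | nil => simp [runM]
  | cons p t ih =>
      obtain ⟨k, v⟩ := p
      rw [runM_cons]
      rcases lt_trichotomy b v with hlt | heq | hgt
      · rw [max_eq_right (le_of_lt hlt)]
        have hb : ¬ b = runM t v := by have := le_runM t v; omega
        have hstep : stepB (some b, acc) (k, v) = (some v, [k]) := by
          simp [stepB, hlt]
        rw [List.foldl_cons, hstep, ih v [k]]
        by_cases h : v = runM t v
        · simp [← h, ne_of_lt hlt]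
        · simp [h, hb]
      · subst heq
        rw [max_self]
        have hstep : stepB (some b, acc) (k, b) = (some b, acc ++ [k]) := by
          simp [stepB]
        rw [List.foldl_cons, hstep, ih b (acc ++ [k])]
        by_cases h : b = runM t b
        · simp [← h, List.append_assoc]
        · simp [h]
      · rw [max_eq_left (le_of_lt hgt)]
        have hp : ¬ v = runM t b := by have := le_runM t b; omega
        have hstep : stepB (some b, acc) (k, v) = (some b, acc) := by
          simp [stepB, not_lt.mpr (le_of_lt hgt), ne_of_lt hgt]
        rw [List.foldl_cons, hstep, ih b acc]
        simp [hp]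

-- A's key list equals B's key list
theorem h1_eq (d : List (String × Int)) :
    d.foldl (fun acc p =>
        if some p.2 = PySem.List.max? (d.map Prod.snd) (fun y => y) then acc ++ [p.1] else acc) []
      = (d.foldl stepB (none, [])).2 := by
  cases d with
  | nil => rfl
  | cons p t =>
      have hmax : PySem.List.max? ((p :: t).map Prod.snd) (fun y => y)
          = some (runM t p.2) := by
        rw [List.map_cons, PySem.List.max?_id_cons]
        simp [runM, List.foldl_map]
      have hB : (p :: t).foldl stepB (none, []) = t.foldl stepB (some p.2, [p.1]) := rfl
      rw [PySem.List.foldl_append_ite, hB, foldB_inv t p.2 [p.1]]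
      have hpred : ∀ q ∈ (p :: t),
          (decide (some q.2 = PySem.List.max? ((p :: t).map Prod.snd) (fun y => y)))
            = (decide (q.2 = runM t p.2)) := by
        intro q _; rw [hmax]; simp
      rw [List.filter_congr hpred, List.filter_cons]
      by_cases h : p.2 = runM t p.2
      · rw [if_pos (by simpa using h), if_pos h]; simp
      · rw [if_neg (by simpa using h), if_neg h]

-- the two formatting tails agree (length > 1 ↔ nonempty, once length ≠ 1)
theorem fmt_eq (h2 : List String) :
    (if h2.length = 1 then (PySem.List.pyGet? h2 0).getD ""
     else if h2.length > 1 then PySem.Str.join "," h2 else "-")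
  = (if h2.length = 1 then (PySem.List.pyGet? h2 0).getD ""
     else if h2 ≠ [] then PySem.Str.join "," h2 else "-") := by
  rcases h2 with _ | ⟨a, _ | ⟨b, t⟩⟩ <;> simp

theorem top_key_eq_alt (d : List (String × Int)) (ref : String) :
    top_key d ref = top_key_alt d ref := by
  simp only [top_key, top_key_alt]
  rw [h1_eq d]
  exact fmt_eq _

-- ===== VERDICT (by name: the statement is the Claim_ definition above) =====
theorem top_key_spec : Claim_equal_top_key := by
  intro d ref _
  exact top_key_eq_alt d ref
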